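-- pv_equiv track=rewrite | github.com/WarlightProgramming/sheetDB | functions.py | getCellNumber
-- ===== SOURCE A (Python) =====
-- import string
--
-- def getCellNumber(label):
--     letters = ""
--     numbers = ""
--     for char in label:
--         if char in string.digits:
--             numbers += char
--         elif char in string.ascii_letters:
--             letters += char
--     if (letters not in label or numbers not in label):
--         raise DataError("Invalid label!")
--     colLabel = letters
--     rowNum = int(numbers)
--     return (rowNum, getColumnNumber(colLabel))
--
-- def getNumber(alpha):
--     return ord(alpha) - 64
--
-- def getColumnNumber(colLabel):
--     colNumber = 0
--     while (len(colLabel) > 0):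
--         exponent = len(colLabel) - 1
--         currentChar = colLabel[0]
--         colLabel = colLabel[1:]
--         colNumber += getNumber(currentChar) * (26 ** exponent)
--     return colNumber
-- ===== SOURCE B (Python) =====
-- def getCellNumber(label):
--     numbers = "".join(filter(str.isdigit, label))
--     letters = "".join(filter(str.isalpha, label))
--     if letters not in label or numbers not in label:
--         raise DataError("Invalid label!")
--     colNumber = 0
--     for c in letters:
--         colNumber = colNumber * 26 + (ord(c) - 64)
--     return (int(numbers), colNumber)
-- ===== Notes on version B (the rewrite author's own statement) =====
-- stated objective: idiomatic
-- what changed: replaces the manual classification loop with two filter/join passes and replaces the helper computing per-character 26**exponent power terms with an inlined left-to-right Horner accumulator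
-- outside the precondition, e.g. on getCellNumber(''): A raises ValueError, B raises ValueError
import Mathlib
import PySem

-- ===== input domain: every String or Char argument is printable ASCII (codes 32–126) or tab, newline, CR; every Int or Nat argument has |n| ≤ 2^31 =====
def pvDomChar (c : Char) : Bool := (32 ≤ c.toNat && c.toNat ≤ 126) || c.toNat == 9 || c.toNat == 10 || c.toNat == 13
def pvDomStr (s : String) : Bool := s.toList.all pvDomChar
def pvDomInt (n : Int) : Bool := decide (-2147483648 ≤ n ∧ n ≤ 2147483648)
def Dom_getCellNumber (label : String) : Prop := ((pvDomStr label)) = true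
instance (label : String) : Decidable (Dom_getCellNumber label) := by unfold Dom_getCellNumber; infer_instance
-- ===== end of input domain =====

-- B replaces A's manual classification loop by two filter passes and A's per-character
-- 26**exponent power-term helper by an inlined Horner accumulator; same cost, more idiomatic.

-- ===== PORT A =====
-- string.digits / string.ascii_letters
def pyDigits : List Char := ['0','1','2','3','4','5','6','7','8','9']
def pyAsciiLetters : List Char :=
  ['a','b','c','d','e','f','g','h','i','j','k','l','m','n','o','p','q','r','s','t','u','v','w','x','y','z',
   'A','B','C','D','E','F','G','H','I','J','K','L','M','N','O','P','Q','R','S','T','U','V','W','X','Y','Z']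

-- getNumber(alpha) = ord(alpha) - 64
def getNumberA (alpha : Char) : Int := (alpha.toNat : Int) - 64

-- getColumnNumber's while loop: exponent = len(colLabel) - 1 is rest.length after popping colLabel[0]
def getColumnNumberA : List Char → Int → Int
  | [], colNumber => colNumber
  | currentChar :: rest, colNumber =>
      getColumnNumberA rest (colNumber + getNumberA currentChar * (26 : Int) ^ rest.length)

def getCellNumber (label : String) : Int × Int :=
  let s := label.toList
  -- the for-loop: acc.1 = letters, acc.2 = numbers
  let p := s.foldl (fun (acc : List Char × List Char) char =>
    if PySem.Chars.isIn [char] pyDigits then (acc.1, acc.2 ++ [char])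
    else if PySem.Chars.isIn [char] pyAsciiLetters then (acc.1 ++ [char], acc.2)
    else acc) ([], [])
  let letters := p.1
  let numbers := p.2
  if !(PySem.Chars.isIn letters s) || !(PySem.Chars.isIn numbers s) then (0, 0)  -- raise DataError: outside Pre_
  else match PySem.Int.ofChars? numbers with
    | none => (0, 0)  -- int('') ValueError: outside Pre_
    | some rowNum => (rowNum, getColumnNumberA letters 0)

-- ===== PORT B =====
def getCellNumber_alt (label : String) : Int × Int :=
  let s := label.toList
  let numbers := s.filter PySem.Chars.isdigit
  let letters := s.filter PySem.Chars.isalpha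
  if !(PySem.Chars.isIn letters s) || !(PySem.Chars.isIn numbers s) then (0, 0)  -- raise DataError: outside Pre_
  else match PySem.Int.ofChars? numbers with
    | none => (0, 0)  -- int('') ValueError: outside Pre_
    | some rowNum =>
        (rowNum, letters.foldl (fun colNumber c => colNumber * 26 + ((c.toNat : Int) - 64)) 0)

-- ===== PRECONDITION & SPEC =====
-- Pre_ excludes exactly the inputs where A raises: letters/numbers subsequences that are not
-- contiguous substrings of the label (DataError) and labels with no digit (int('') ValueError).
def Pre_getCellNumber (label : String) : Prop :=
  (label.toList.filter PySem.Chars.isalpha) <:+: label.toList ∧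
  (label.toList.filter PySem.Chars.isdigit) <:+: label.toList ∧
  label.toList.filter PySem.Chars.isdigit ≠ []
instance (label : String) : Decidable (Pre_getCellNumber label) := by
  unfold Pre_getCellNumber; infer_instance

def pvWitness_getCellNumber : String := "B2"

def Spec_getCellNumber (label : String) (out : Int × Int) : Prop := out = getCellNumber_alt label
instance (label : String) (out : Int × Int) : Decidable (Spec_getCellNumber label out) := by
  unfold Spec_getCellNumber; infer_instance

-- ===== CLAIM (what is proved, stated in full; the proofs are below) =====
def Claim_equal_getCellNumber : Prop := ∀ (label : String), Dom_getCellNumber label → Pre_getCellNumber label → Spec_getCellNumber label (getCellNumber label)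

-- ===== LEMMAS AND PROOFS =====

-- 'char in string.digits' (a one-char infix test) agrees with str.isdigit on every Char
lemma isIn_digits_eq (c : Char) : PySem.Chars.isIn [c] pyDigits = PySem.Chars.isdigit c := by
  rw [Bool.eq_iff_iff, PySem.Chars.isIn_iff_infix, List.singleton_infix_iff]
  constructor
  · intro h; fin_cases h <;> decide
  · intro h
    have hb : 48 ≤ c.toNat ∧ c.toNat ≤ 57 := by
      simp [PySem.Chars.isdigit, Char.le_def, UInt32.le_iff_toNat_le] at h
      omega
    obtain ⟨h1, h2⟩ := hb
    interval_cases h : c.toNat <;> (rw [← Char.ofNat_toNat c, h]; decide)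

-- 'char in string.ascii_letters' agrees with str.isalpha on every Char
lemma isIn_letters_eq (c : Char) : PySem.Chars.isIn [c] pyAsciiLetters = PySem.Chars.isalpha c := by
  rw [Bool.eq_iff_iff, PySem.Chars.isIn_iff_infix, List.singleton_infix_iff]
  constructor
  · intro h; fin_cases h <;> decide
  · intro h
    have hb : (65 ≤ c.toNat ∧ c.toNat ≤ 90) ∨ (97 ≤ c.toNat ∧ c.toNat ≤ 122) := by
      simp [PySem.Chars.isalpha, PySem.Chars.isupper, PySem.Chars.islower, Char.le_def,
        UInt32.le_iff_toNat_le] at h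
      omega
    rcases hb with ⟨h1, h2⟩ | ⟨h1, h2⟩ <;>
      (interval_cases h : c.toNat <;> (rw [← Char.ofNat_toNat c, h]; decide))

lemma not_isalpha_of_isdigit (c : Char) (h : PySem.Chars.isdigit c = true) :
    PySem.Chars.isalpha c = false := by
  simp [PySem.Chars.isdigit, PySem.Chars.isalpha, PySem.Chars.isupper, PySem.Chars.islower,
    Char.le_def, UInt32.le_iff_toNat_le] at h ⊢
  omega

-- A's classification loop = the two filters
lemma classify_eq (s : List Char) : ∀ ls ns : List Char,
    s.foldl (fun (acc : List Char × List Char) char =>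
      if PySem.Chars.isdigit char then (acc.1, acc.2 ++ [char])
      else if PySem.Chars.isalpha char then (acc.1 ++ [char], acc.2)
      else acc) (ls, ns)
    = (ls ++ s.filter PySem.Chars.isalpha, ns ++ s.filter PySem.Chars.isdigit) := by
  induction s with
  | nil => simp
  | cons c t ih =>
    intro ls ns
    simp only [List.foldl_cons, List.filter_cons]
    by_cases hd : PySem.Chars.isdigit c = true
    · simp [hd, not_isalpha_of_isdigit c hd, ih]
    · by_cases ha : PySem.Chars.isalpha c = true
      · simp [hd, ha, ih]
      · simp [hd, ha, ih]

-- shifting the Horner accumulator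
lemma horner_shift (l : List Char) : ∀ a : Int,
    l.foldl (fun colNumber c => colNumber * 26 + ((c.toNat : Int) - 64)) a
    = a * 26 ^ l.length + l.foldl (fun colNumber c => colNumber * 26 + ((c.toNat : Int) - 64)) 0 := by
  induction l with
  | nil => simp
  | cons c t ih =>
    intro a
    simp only [List.foldl_cons, List.length_cons]
    rw [ih (a * 26 + ((c.toNat : Int) - 64)), ih (0 * 26 + ((c.toNat : Int) - 64))]
    ring

-- A's power-term column sum = B's Horner fold
lemma colA_eq (l : List Char) : ∀ acc : Int,
    getColumnNumberA l acc
    = acc + l.foldl (fun colNumber c => colNumber * 26 + ((c.toNat : Int) - 64)) 0 := by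
  induction l with
  | nil => intro acc; simp [getColumnNumberA]
  | cons c t ih =>
    intro acc
    rw [getColumnNumberA, ih, List.foldl_cons,
      horner_shift t (0 * 26 + ((c.toNat : Int) - 64))]
    simp only [getNumberA]
    ring

-- ===== VERDICT (by name: the statement is the Claim_ definition above) =====
theorem getCellNumber_spec : Claim_equal_getCellNumber := by
  intro label _ _
  unfold Spec_getCellNumber getCellNumber getCellNumber_alt
  simp only [isIn_digits_eq, isIn_letters_eq, classify_eq label.toList [] [], List.nil_append]
  split_ifs with h
  · rfl
  · cases PySem.Int.ofChars? (label.toList.filter PySem.Chars.isdigit) with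
    | none => rfl
    | some r => simp [colA_eq]
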